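-- pv_equiv track=rewrite | github.com/CandeGodoy/prog | programacion/resoluciones/FINAL - matriz y recursiva aplanada.py | recursiva
-- ===== SOURCE A (Python) =====
-- def recursiva(x,y,matrizRe,lista):
--
--     if len(lista)==len(matrizRe)*len(matrizRe):
--         return lista
--     else:
--         lista.append(matrizRe[x][y])
--
--     if y == len(matrizRe)-1:
--         y=0
--         return recursiva(x+1,y,matrizRe,lista)
--     else:
--         return recursiva(x,y+1,matrizRe,lista)
-- ===== SOURCE B (Python) =====
-- def recursiva(x, y, matrizRe, lista):
--     n = len(matrizRe)
--     p = x * n + y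
--     lista.extend(matrizRe[(p + i) // n][(p + i) % n]
--                  for i in range(n * n - len(lista)))
--     return lista
-- ===== Notes on version B (the rewrite author's own statement) =====
-- stated objective: simpler
-- what changed: Replaces the per-element tail-recursion over a (row,column) pair and its repeated length test with one staged computation: compute the count of missing elements once and extend the list with a single generator over range, decoding each linear row-major position as p//n, p%n.
-- outside the precondition, e.g. on recursiva(0, -1, [[1, 2], [3, 4]], []): A returns [2, 1, 2, 3], B returns [4, 1, 2, 3]; on recursiva(0, 2, [[1, 2, 3], [4, 5, 6]], [9, 9, 9]): A returns [9, 9, 9, 3], B returns [9, 9, 9, 4]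
import Mathlib
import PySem

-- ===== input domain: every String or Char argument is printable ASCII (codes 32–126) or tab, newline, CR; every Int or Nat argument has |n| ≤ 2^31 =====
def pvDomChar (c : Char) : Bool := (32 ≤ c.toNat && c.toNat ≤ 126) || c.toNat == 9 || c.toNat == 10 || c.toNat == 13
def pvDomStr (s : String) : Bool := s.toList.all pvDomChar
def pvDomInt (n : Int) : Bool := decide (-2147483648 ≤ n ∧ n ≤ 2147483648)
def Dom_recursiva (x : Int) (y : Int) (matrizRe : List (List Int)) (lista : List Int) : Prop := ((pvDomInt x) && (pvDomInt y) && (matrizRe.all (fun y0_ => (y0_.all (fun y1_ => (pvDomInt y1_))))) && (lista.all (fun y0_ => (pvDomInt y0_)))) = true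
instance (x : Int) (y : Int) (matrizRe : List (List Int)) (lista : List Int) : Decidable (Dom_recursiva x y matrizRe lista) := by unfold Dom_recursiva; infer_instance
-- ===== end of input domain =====

-- B replaces the (x,y)-pair tail recursion with one staged computation: count the missing
-- elements once and extend the list with a single generator over range (row p//n, col p%n).
-- Python A and B both mutate and return the same `lista` object; the equivalence proved is
-- about the returned value.


-- ===== PORT A =====
-- Fuel makes the recursion structural; on every input admitted by Pre_recursiva the
-- recursion performs (len matrizRe)^2 - (len lista) appends plus one final call, so the
-- fuel n*n + 1 is never exhausted there (inputs where Python A raises lie outside Pre_).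
def recursivaGo : Nat → Int → Int → List (List Int) → List Int → List Int
  | 0, _, _, _, lista => lista
  | fuel+1, x, y, matrizRe, lista =>
    if lista.length = matrizRe.length * matrizRe.length then lista
    else
      match PySem.List.pyGet? matrizRe x with
      | none => lista           -- IndexError: excluded by Pre_
      | some row =>
        match PySem.List.pyGet? row y with
        | none => lista         -- IndexError: excluded by Pre_
        | some v =>
          if y = (matrizRe.length : Int) - 1 then
            recursivaGo fuel (x+1) 0 matrizRe (lista ++ [v])
          else
            recursivaGo fuel x (y+1) matrizRe (lista ++ [v])

def recursiva (x : Int) (y : Int) (matrizRe : List (List Int)) (lista : List Int) : List Int :=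
  recursivaGo (matrizRe.length * matrizRe.length + 1) x y matrizRe lista

-- ===== PORT B =====
-- matrizRe[q // n][q % n]; exact where both Python indexes are in range (Pre_ guarantees
-- this for every generated position; Python raises IndexError otherwise).
def pvCell (m : List (List Int)) (q : Int) : Int :=
  ((PySem.List.pyGet? ((PySem.List.pyGet? m (PySem.Int.floordiv q (m.length : Int))).getD [])
      (PySem.Int.mod q (m.length : Int))).getD 0)

def recursiva_alt (x : Int) (y : Int) (matrizRe : List (List Int)) (lista : List Int) : List Int :=
  lista ++
    (PySem.List.pyRange 0 ((matrizRe.length * matrizRe.length : Int) - lista.length) 1).map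
      (fun i => pvCell matrizRe (x * matrizRe.length + y + i))

-- ===== PRECONDITION & SPEC =====
-- pvCellOk m p: the row-major cell p of m exists under Python indexing (row p//n wraps once).
def pvCellOk (m : List (List Int)) (p : Int) : Prop :=
  (PySem.Int.mod p m.length).toNat <
    (m.getD ((PySem.Int.mod (PySem.Int.floordiv p (m.length : Int)) (m.length : Int)).toNat) []).length

-- Pre_ admits the natural domain: either lista is already full (A returns it at once,
-- whatever x and y are), or -n <= x < n (Python wraps a negative row index), 0 <= y < n,
-- lista's length is at least the start position x*n+y and below n*n, and every cell of the
-- walked row-major segment exists.  Pre_ excludes inputs on which A still returns only when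
-- y is negative (column wraparound) or y >= n (A then walks past the row-major order);
-- there the two programs read different cells and both values are index-arithmetic accidents.
def Pre_recursiva (x : Int) (y : Int) (matrizRe : List (List Int)) (lista : List Int) : Prop :=
  lista.length = matrizRe.length * matrizRe.length ∨
  (-(matrizRe.length : Int) ≤ x ∧ 0 ≤ y ∧ y < (matrizRe.length : Int) ∧
   x * matrizRe.length + y ≤ (lista.length : Int) ∧
   lista.length < matrizRe.length * matrizRe.length ∧
   ∀ k : Nat, k < matrizRe.length * matrizRe.length - lista.length →
     pvCellOk matrizRe (x * matrizRe.length + y + k))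

instance (x : Int) (y : Int) (matrizRe : List (List Int)) (lista : List Int) : Decidable (Pre_recursiva x y matrizRe lista) := by unfold Pre_recursiva pvCellOk; infer_instance

def pvWitness_recursiva : Int × Int × List (List Int) × List Int := (0, 1, [[1, 2], [3, 4]], [7])

def Spec_recursiva (x : Int) (y : Int) (matrizRe : List (List Int)) (lista : List Int) (out : List Int) : Prop := out = recursiva_alt x y matrizRe lista
instance (x : Int) (y : Int) (matrizRe : List (List Int)) (lista : List Int) (out : List Int) : Decidable (Spec_recursiva x y matrizRe lista out) := by unfold Spec_recursiva; infer_instance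

-- ===== CLAIM (what is proved, stated in full; the proofs are below) =====
def Claim_equal_recursiva : Prop := ∀ (x : Int) (y : Int) (matrizRe : List (List Int)) (lista : List Int), Dom_recursiva x y matrizRe lista → Pre_recursiva x y matrizRe lista → Spec_recursiva x y matrizRe lista (recursiva x y matrizRe lista)

-- ===== LEMMAS AND PROOFS =====

-- Python's xs[i] for an in-range index i (possibly negative)
lemma pyGet_inrange (xs : List (List Int)) (i : Int) (h0 : -(xs.length : Int) ≤ i)
    (h1 : i < (xs.length : Int)) (hn : 0 < xs.length) :
    PySem.List.pyGet? xs i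
      = some (xs.getD ((PySem.Int.mod i (xs.length : Int)).toNat) []) := by
  have hmod : PySem.Int.mod i (xs.length : Int) = i % (xs.length : Int) :=
    PySem.Int.mod_eq_emod_of_pos (by exact_mod_cast hn)
  simp only [PySem.List.pyGet?, PySem.List.pyIdx?]
  by_cases hpos : 0 ≤ i
  · rw [if_pos hpos, if_pos h1]
    have : i % (xs.length : Int) = i := Int.emod_eq_of_lt hpos h1
    rw [hmod, this]
    simp only [Option.bind]
    rw [List.getD_eq_getElem _ _ (by omega)]
    exact List.getElem?_eq_getElem (by omega)
  · rw [if_neg hpos, if_pos h0]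
    have hwrap : i % (xs.length : Int) = i + xs.length := by
      have h1' : (i + xs.length) % (xs.length : Int) = i + xs.length :=
        Int.emod_eq_of_lt (by omega) (by omega)
      calc i % (xs.length : Int) = (i + xs.length * 1) % (xs.length : Int) := by
            rw [Int.add_mul_emod_self_left]
        _ = i + xs.length := by rw [mul_one, h1']
    rw [hmod, hwrap]
    simp only [Option.bind]
    have hidx : xs.length - (-i).toNat = (i + xs.length).toNat := by omega
    rw [hidx, List.getD_eq_getElem _ _ (by omega)]
    exact List.getElem?_eq_getElem (by omega)

-- peel the first element off a mapped range(k)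
lemma map_pyRange_shift (f : Int → Int) (k : Int) (hk : 0 < k) :
    (PySem.List.pyRange 0 k 1).map f
      = f 0 :: (PySem.List.pyRange 0 (k-1) 1).map (fun i => f (i+1)) := by
  rw [PySem.List.pyRange_one, PySem.List.pyRange_one]
  have h : (k - 0).toNat = (k - 1 - 0).toNat + 1 := by omega
  rw [h, List.range_succ_eq_map]
  simp only [List.map_cons, List.map_map]
  constructor

lemma go_eq (fuel : Nat) : ∀ (x : Int) (b : Nat) (m : List (List Int)) (lista : List Int),
    -(m.length : Int) ≤ x →
    b < m.length →
    x * m.length + b ≤ (lista.length : Int) →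
    lista.length ≤ m.length * m.length →
    (∀ k : Nat, k < m.length * m.length - lista.length →
      pvCellOk m (x * m.length + b + k)) →
    m.length * m.length - lista.length < fuel →
    recursivaGo fuel x (b : Int) m lista
      = lista ++ (PySem.List.pyRange 0 ((m.length * m.length : Int) - lista.length) 1).map
          (fun i => pvCell m (x * m.length + b + i)) := by
  induction fuel with
  | zero => intro x b m lista _ _ _ _ _ hfuel; omega
  | succ fuel ih =>
    intro x b m lista hxlo hb hs hle hcells hfuel
    by_cases hfull : lista.length = m.length * m.length
    · rw [PySem.List.pyRange_one_eq_nil (by omega)]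
      simp [recursivaGo, hfull]
    · have hlt : lista.length < m.length * m.length := lt_of_le_of_ne hle hfull
      have hn : 0 < m.length := by
        rcases Nat.eq_zero_or_pos m.length with h0 | h0
        · rw [h0] at hlt; simp at hlt
        · exact h0
      have hnI : (0:Int) < (m.length : Int) := by exact_mod_cast hn
      have hxhi : x < (m.length : Int) := by
        have hmul : x * m.length < (m.length : Int) * m.length := by
          have : ((lista.length : Int)) < (m.length : Int) * m.length := by exact_mod_cast hlt
          have hb0 : (0:Int) ≤ (b : Int) := by positivity
          linarith
        exact lt_of_mul_lt_mul_right hmul (le_of_lt hnI)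
      have hdiv : PySem.Int.floordiv (x * m.length + b) (m.length : Int) = x := by
        rw [PySem.Int.floordiv_eq_iff_of_pos hnI]
        constructor
        · have : (0:Int) ≤ (b : Int) := by positivity
          linarith
        · have hbI : (b : Int) < (m.length : Int) := by exact_mod_cast hb
          have hr : ((x + 1) * m.length : Int) = x * m.length + m.length := by ring
          linarith
      have hmod : PySem.Int.mod (x * m.length + b) (m.length : Int) = (b : Int) := by
        have h1 := PySem.Int.floordiv_mul_add_mod (x * m.length + b) (m.length : Int)
        rw [hdiv] at h1
        linarith
      have hrowlen : b < (m.getD ((PySem.Int.mod x (m.length : Int)).toNat) []).length := by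
        have h0 := hcells 0 (by omega)
        unfold pvCellOk at h0
        rw [Nat.cast_zero, add_zero, hdiv, hmod] at h0
        simpa using h0
      have hgetA : PySem.List.pyGet? m x
          = some (m.getD ((PySem.Int.mod x (m.length : Int)).toNat) []) :=
        pyGet_inrange m x hxlo hxhi hn
      set row := m.getD ((PySem.Int.mod x (m.length : Int)).toNat) [] with hrow
      have hgetB : PySem.List.pyGet? row (b : Int) = some (row.getD b 0) := by
        rw [PySem.List.pyGet?_of_nonneg_of_lt _ (by positivity) (by exact_mod_cast hrowlen)]
        simp only [Int.toNat_natCast]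
        rw [List.getD_eq_getElem _ _ hrowlen]
        exact List.getElem?_eq_getElem hrowlen
      set v := row.getD b 0 with hv
      have hcell : pvCell m (x * m.length + b) = v := by
        unfold pvCell
        rw [hdiv, hmod, hgetA]
        simp only [Option.getD_some, hgetB]
      have hlen' : (lista ++ [v]).length = lista.length + 1 := by simp
      -- peel the head of B's range
      have hk : (0:Int) < (m.length * m.length : Int) - lista.length := by
        have hx : (lista.length : Int) < (m.length : Int) * m.length := by exact_mod_cast hlt
        linarith
      have hpeel := map_pyRange_shift (fun i => pvCell m (x * m.length + b + i))
        ((m.length * m.length : Int) - lista.length) hk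
      have hcells' : ∀ k : Nat, k < m.length * m.length - (lista ++ [v]).length →
          pvCellOk m ((x * m.length + b + 1) + k) := by
        intro k hk'
        rw [hlen'] at hk'
        have := hcells (k+1) (by omega)
        rwa [(by push_cast; ring : (x * m.length + (b:Int) + ((k:Nat)+1 : Nat))
          = (x * m.length + b + 1) + (k : Int))] at this
      have hlenInt : ((m.length * m.length : Int) - lista.length) - 1
          = (m.length * m.length : Int) - ((lista ++ [v]).length : Int) := by
        rw [hlen']; push_cast; ring
      show (if lista.length = m.length * m.length then lista
        else
          match PySem.List.pyGet? m x with
          | none => lista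
          | some row =>
            match PySem.List.pyGet? row (b : Int) with
            | none => lista
            | some v =>
              if (b : Int) = (m.length : Int) - 1 then
                recursivaGo fuel (x+1) 0 m (lista ++ [v])
              else
                recursivaGo fuel x ((b : Int)+1) m (lista ++ [v])) = _
      rw [if_neg hfull]
      simp only [hgetA, hgetB]
      rw [hpeel]
      by_cases hbend : (b : Int) = (m.length : Int) - 1
      · rw [if_pos hbend]
        have hsum : (x + 1) * (m.length : Int) + ((0:Nat) : Int) = x * m.length + b + 1 := by
          push_cast; rw [add_mul]; linarith
        have hrec := ih (x+1) 0 m (lista ++ [v]) (by linarith)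
          hn
          (by rw [hsum, hlen']; push_cast at hs ⊢; linarith)
          (by rw [hlen']; omega)
          (by rw [hsum]; exact hcells')
          (by rw [hlen']; omega)
        rw [hsum, ← hlenInt] at hrec
        rw [(by norm_cast : (0 : Int) = ((0 : Nat) : Int)), hrec]
        have hmap : (PySem.List.pyRange 0 ((m.length * m.length : Int) - lista.length - 1) 1).map
              (fun i => pvCell m (x * m.length + b + 1 + i))
            = (PySem.List.pyRange 0 ((m.length * m.length : Int) - lista.length - 1) 1).map
              (fun i => pvCell m (x * m.length + b + (i + 1))) :=
          List.map_congr_left (fun i _ => by congr 1; ring)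
        rw [hmap]
        simp [hcell]
      · rw [if_neg hbend]
        have hb1 : b + 1 < m.length := by
          have : (b:Int) ≠ (m.length : Int) - 1 := hbend
          omega
        have hsum : x * (m.length : Int) + ((b+1 : Nat) : Int) = x * m.length + b + 1 := by
          push_cast; ring
        have hrec := ih x (b+1) m (lista ++ [v]) hxlo
          hb1
          (by rw [hsum, hlen']; push_cast at hs ⊢; linarith)
          (by rw [hlen']; omega)
          (by rw [hsum]; exact hcells')
          (by rw [hlen']; omega)
        rw [hsum, ← hlenInt] at hrec
        rw [(by push_cast; ring : ((b : Int) + 1) = (((b+1 : Nat)) : Int)), hrec]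
        have hmap : (PySem.List.pyRange 0 ((m.length * m.length : Int) - lista.length - 1) 1).map
              (fun i => pvCell m (x * m.length + b + 1 + i))
            = (PySem.List.pyRange 0 ((m.length * m.length : Int) - lista.length - 1) 1).map
              (fun i => pvCell m (x * m.length + b + (i + 1))) :=
          List.map_congr_left (fun i _ => by congr 1; ring)
        rw [hmap]
        simp [hcell]

-- ===== VERDICT (by name: the statement is the Claim_ definition above) =====
theorem recursiva_spec : Claim_equal_recursiva := by
  intro x y m lista _ hpre
  unfold Spec_recursiva recursiva recursiva_alt
  rcases hpre with hfull | ⟨hxlo, hy, hyn, hs, hlt, hcells⟩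
  · rw [PySem.List.pyRange_one_eq_nil (by omega)]
    simp [recursivaGo, hfull]
  · obtain ⟨b, rfl⟩ : ∃ b : Nat, y = (b : Int) := ⟨y.toNat, (Int.toNat_of_nonneg hy).symm⟩
    exact go_eq (m.length * m.length + 1) x b m lista hxlo (by exact_mod_cast hyn) hs
      (le_of_lt hlt) hcells (by omega)
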